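-- pv_equiv track=rewrite | github.com/Albans98/AI_Player | AI_Project.py | Verifier_colonnes
-- ===== SOURCE A (Python) =====
-- def Verifier_colonnes(grille):
--     compteur = 0
--     for i in range(0, len(grille)):
--         for j in range(0, len(grille[i]) - 4):
--             compteur = 0
--             if grille [j][i] != " ":
--                 for k in range(1, 5):
--                     if grille[j][i] == grille[j + k][i]:
--                         compteur += 1
--                 if compteur == 4:
--                     return [True, grille[j][i]]
--     return [False, " "]
-- ===== SOURCE B (Python) =====
-- def Verifier_colonnes(grille):
--     for i in range(len(grille)):
--         hauteur = len(grille[i])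
--         if hauteur < 5:
--             continue
--         serie = 0
--         jeton = " "
--         for j in range(hauteur):
--             case = grille[j][i]
--             if case == " ":
--                 serie = 0
--             elif case == jeton:
--                 serie += 1
--             else:
--                 jeton = case
--                 serie = 1
--             if serie == 5:
--                 return [True, jeton]
--     return [False, " "]
-- ===== Notes on version B (the rewrite author's own statement) =====
-- stated objective: simpler
-- what changed: Replaces the per-start-position window re-check (inner k-loop counting 4 matches for every start j) with a single left-to-right streak scan per column that keeps a running count of consecutive identical non-blank tokens and fires when it reaches 5.
-- outside the precondition, e.g. on Verifier_colonnes([[' ', ' ', ' ', ' ', ' '], ['x']]): A returns (False, ' '), B raises IndexError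
import Mathlib
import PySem

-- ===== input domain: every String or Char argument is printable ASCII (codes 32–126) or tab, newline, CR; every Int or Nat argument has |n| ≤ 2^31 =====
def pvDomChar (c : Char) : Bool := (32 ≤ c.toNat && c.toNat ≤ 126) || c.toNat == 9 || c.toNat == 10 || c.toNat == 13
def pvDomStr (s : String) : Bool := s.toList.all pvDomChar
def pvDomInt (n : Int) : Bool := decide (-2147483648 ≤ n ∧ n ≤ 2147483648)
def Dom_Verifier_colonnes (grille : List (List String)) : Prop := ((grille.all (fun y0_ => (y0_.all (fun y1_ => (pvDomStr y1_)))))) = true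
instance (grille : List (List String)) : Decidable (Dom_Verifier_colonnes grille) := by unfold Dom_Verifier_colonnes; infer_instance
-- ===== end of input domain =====

-- B replaces A's per-start window re-check by a single streak scan per column (simpler, same result).


-- ===== PORT A =====
-- cell access grille[j][i]; under Pre_ every access either port performs is in range, so getD equals Python's indexing there
def pvCell (g : List (List String)) (j i : Nat) : String := (g.getD j []).getD i ""

-- the k-loop: compteur = number of k in 1..4 with grille[j][i] == grille[j+k][i]
def pvCount (g : List (List String)) (i j : Nat) : Nat :=
  (List.range' 1 4).foldl (fun c k => if pvCell g j i = pvCell g (j + k) i then c + 1 else c) 0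

-- the j-loop over range(len(grille[i]) - 4), with early return as Option
def pvRowA (g : List (List String)) (i : Nat) : List Nat → Option (Bool × String)
  | [] => none
  | j :: js =>
    if pvCell g j i ≠ " " then
      if pvCount g i j = 4 then some (true, pvCell g j i) else pvRowA g i js
    else pvRowA g i js

-- the i-loop over range(len(grille))
def pvGridA (g : List (List String)) : List Nat → Option (Bool × String)
  | [] => none
  | i :: is =>
    match pvRowA g i (List.range ((g.getD i []).length - 4)) with
    | some r => some r
    | none => pvGridA g is

def Verifier_colonnes (grille : List (List String)) : Bool × String :=
  (pvGridA grille (List.range grille.length)).getD (false, " ")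

-- ===== PORT B =====
-- streak scan of one column: (serie, jeton) state, fires when serie hits 5
def pvScanB (g : List (List String)) (i : Nat) : Nat → String → List Nat → Option (Bool × String)
  | _, _, [] => none
  | serie, jeton, j :: js =>
    let c := pvCell g j i
    let p : Nat × String :=
      if c = " " then (0, jeton) else if c = jeton then (serie + 1, jeton) else (1, c)
    if p.1 = 5 then some (true, p.2) else pvScanB g i p.1 p.2 js

-- the i-loop: columns shorter than 5 are skipped
def pvColsB (g : List (List String)) : List Nat → Option (Bool × String)
  | [] => none
  | i :: is =>
    if (g.getD i []).length < 5 then pvColsB g is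
    else
      match pvScanB g i 0 " " (List.range (g.getD i []).length) with
      | some r => some r
      | none => pvColsB g is

def Verifier_colonnes_alt (grille : List (List String)) : Bool × String :=
  (pvColsB grille (List.range grille.length)).getD (false, " ")

-- ===== PRECONDITION & SPEC =====
-- Pre_ excludes ragged grids on which some cell access of the column loops would be out of
-- range (IndexError); on a few of those A still returns normally because a blank cell or an
-- early win makes it skip the out-of-range access, while B's scan reaches it and raises.
def Pre_Verifier_colonnes (grille : List (List String)) : Prop :=
  ∀ i < grille.length, 5 ≤ (grille.getD i []).length →
    (grille.getD i []).length ≤ grille.length ∧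
    ∀ j < (grille.getD i []).length, i < (grille.getD j []).length

instance (grille : List (List String)) : Decidable (Pre_Verifier_colonnes grille) := by
  unfold Pre_Verifier_colonnes; infer_instance

def pvWitness_Verifier_colonnes : List (List String) :=
  [["X", "O", " ", "O", "X"], ["O", "X", "X", "X", "O"], ["X", "X", "O", "O", "X"],
   ["O", "O", "X", "X", "O"], ["X", "O", "O", "X", "X"]]

def Spec_Verifier_colonnes (grille : List (List String)) (out : Bool × String) : Prop := out = Verifier_colonnes_alt grille
instance (grille : List (List String)) (out : Bool × String) : Decidable (Spec_Verifier_colonnes grille out) := by unfold Spec_Verifier_colonnes; infer_instance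

-- ===== CLAIM (what is proved, stated in full; the proofs are below) =====
def Claim_equal_Verifier_colonnes : Prop := ∀ (grille : List (List String)), Dom_Verifier_colonnes grille → Pre_Verifier_colonnes grille → Spec_Verifier_colonnes grille (Verifier_colonnes grille)

-- ===== LEMMAS AND PROOFS =====

-- W g i j: the window of 5 cells starting at row j in column i is one non-blank token
def pvW (g : List (List String)) (i j : Nat) : Bool :=
  (pvCell g j i != " ") && (pvCell g j i == pvCell g (j + 1) i) &&
  (pvCell g j i == pvCell g (j + 2) i) && (pvCell g j i == pvCell g (j + 3) i) &&
  (pvCell g j i == pvCell g (j + 4) i)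

theorem pvW_iff (g : List (List String)) (i j : Nat) :
    pvW g i j = true ↔
      (pvCell g j i ≠ " " ∧ pvCell g j i = pvCell g (j + 1) i ∧
       pvCell g j i = pvCell g (j + 2) i ∧ pvCell g j i = pvCell g (j + 3) i ∧
       pvCell g j i = pvCell g (j + 4) i) := by
  simp only [pvW, Bool.and_eq_true, bne_iff_ne, ne_eq, beq_iff_eq]
  tauto

theorem pvW_nonblank {g : List (List String)} {i j : Nat} (h : pvW g i j = true) :
    pvCell g j i ≠ " " := ((pvW_iff g i j).1 h).1

theorem pvW_cell {g : List (List String)} {i j : Nat} (h : pvW g i j = true)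
    (p : Nat) (h1 : j ≤ p) (h2 : p ≤ j + 4) : pvCell g p i = pvCell g j i := by
  obtain ⟨_, e1, e2, e3, e4⟩ := (pvW_iff g i j).1 h
  have : p = j ∨ p = j + 1 ∨ p = j + 2 ∨ p = j + 3 ∨ p = j + 4 := by omega
  rcases this with h' | h' | h' | h' | h' <;> subst h'
  · rfl
  · exact e1.symm
  · exact e2.symm
  · exact e3.symm
  · exact e4.symm

theorem pvCount_eq_four (g : List (List String)) (i j : Nat) :
    (pvCount g i j = 4) ↔
      (pvCell g j i = pvCell g (j + 1) i ∧ pvCell g j i = pvCell g (j + 2) i ∧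
       pvCell g j i = pvCell g (j + 3) i ∧ pvCell g j i = pvCell g (j + 4) i) := by
  simp only [pvCount, List.range', List.foldl]
  split_ifs <;> simp_all

theorem pvRowA_find (g : List (List String)) (i : Nat) (js : List Nat) :
    pvRowA g i js = (js.find? (fun j => pvW g i j)).map (fun j => (true, pvCell g j i)) := by
  induction js with
  | nil => simp [pvRowA]
  | cons j js ih =>
    by_cases h0 : pvCell g j i = " "
    · have hw : pvW g i j = false := by simp [pvW, h0]
      simp [pvRowA, h0, hw, List.find?, ih]
    · by_cases hc : pvCount g i j = 4
      · have hw : pvW g i j = true := by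
          obtain ⟨e1, e2, e3, e4⟩ := (pvCount_eq_four g i j).1 hc
          exact (pvW_iff g i j).2 ⟨h0, e1, e2, e3, e4⟩
        simp [pvRowA, h0, hc, List.find?, hw]
      · have hw : pvW g i j = false := by
          rcases Bool.eq_false_or_eq_true (pvW g i j) with h | h
          · obtain ⟨_, e1, e2, e3, e4⟩ := (pvW_iff g i j).1 h
            exact absurd ((pvCount_eq_four g i j).2 ⟨e1, e2, e3, e4⟩) hc
          · exact h
        simp [pvRowA, h0, hc, List.find?, hw, ih]

theorem find?_range'_none {p : Nat → Bool} {a n : Nat}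
    (h : ∀ j, a ≤ j → j < a + n → p j = false) :
    (List.range' a n).find? p = none := by
  apply List.find?_eq_none.mpr
  intro j hj
  simp [List.mem_range'_1] at hj
  simp [h j hj.1 hj.2]

theorem find?_range'_some {p : Nat → Bool} {a n j0 : Nat}
    (h0 : a ≤ j0) (h1 : j0 < a + n) (hp : p j0 = true)
    (hmin : ∀ j, a ≤ j → j < j0 → p j = false) :
    (List.range' a n).find? p = some j0 := by
  induction n generalizing a with
  | zero => omega
  | succ n ih =>
    rw [List.range'_succ]
    by_cases ha : a = j0
    · subst ha; simp [List.find?, hp]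
    · have hpa : p a = false := hmin a le_rfl (by omega)
      simp only [List.find?, hpa]
      exact ih (by omega) (by omega) (fun j hj1 hj2 => hmin j (by omega) hj2)

theorem find?_range_none {p : Nat → Bool} {n : Nat}
    (h : ∀ j, j < n → p j = false) : (List.range n).find? p = none := by
  rw [List.range_eq_range']
  exact find?_range'_none (fun j _ hj => h j (by omega))

theorem find?_range_some {p : Nat → Bool} {n j0 : Nat}
    (h1 : j0 < n) (hp : p j0 = true) (hmin : ∀ j, j < j0 → p j = false) :
    (List.range n).find? p = some j0 := by
  rw [List.range_eq_range']
  exact find?_range'_some (Nat.zero_le _) (by omega) hp (fun j _ hj => hmin j hj)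

-- the streak-scan invariant: (serie, jeton) is exactly the run of equal non-blank cells ending
-- just before row a, no 5-window ends before row a, and then the scan finds A's first window
theorem pvScanB_invariant (g : List (List String)) (i L : Nat) :
    ∀ n a s t, a + n = L → s ≤ 4 → s ≤ a →
    (∀ m, m < s → pvCell g (a - 1 - m) i = t ∧ t ≠ " ") →
    (s = 0 → a = 0 ∨ pvCell g (a - 1) i = " ") →
    (1 ≤ s → s = a ∨ pvCell g (a - 1 - s) i = " " ∨ pvCell g (a - 1 - s) i ≠ t) →
    (∀ j, pvW g i j = true → a ≤ j + s) →
    pvScanB g i s t (List.range' a n) =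
      ((List.range (L - 4)).find? (fun j => pvW g i j)).map (fun j => (true, pvCell g j i)) := by
  intro n
  induction n with
  | zero =>
    intro a s t hL _ _ _ _ _ h5
    have hnone : (List.range (L - 4)).find? (fun j => pvW g i j) = none := by
      apply find?_range_none
      intro j hj
      rcases Bool.eq_false_or_eq_true (pvW g i j) with h | h
      · exact absurd (h5 j h) (by omega)
      · exact h
    simp [pvScanB, hnone]
  | succ n ih =>
    intro a s t hL hs4 hsa h2 h3 h4 h5
    rw [List.range'_succ]
    simp only [pvScanB]
    by_cases hc0 : pvCell g a i = " "
    · -- blank cell: serie resets to 0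
      have h5' : ∀ j, pvW g i j = true → a + 1 ≤ j := by
        intro j hw
        have hja := h5 j hw
        by_cases hj : j ≤ a
        · have := pvW_cell hw a hj (by omega)
          exact absurd (this ▸ hc0) (pvW_nonblank hw)
        · omega
      simp only [hc0, if_true]
      exact ih (a + 1) 0 t (by omega) (by omega) (by omega)
        (by omega) (fun _ => Or.inr (by simpa using hc0)) (by omega)
        (fun j hw => by have := h5' j hw; omega)
    · by_cases hct : pvCell g a i = t
      · -- same token: serie + 1
        have ht : t ≠ " " := fun h => hc0 (hct.trans h)
        have hp1 : (if pvCell g a i = " " then ((0 : Nat), t)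
            else if pvCell g a i = t then (s + 1, t) else (1, pvCell g a i)) = (s + 1, t) := by
          rw [if_neg hc0, if_pos hct]
        rw [hp1]
        by_cases hfire : s + 1 = 5
        · -- serie hits 5: A's first window starts at a - 4
          have hs : s = 4 := by omega
          subst hs
          have ha4 : 4 ≤ a := hsa
          have hrun : ∀ m, m < 4 → pvCell g (a - 1 - m) i = t := fun m hm => (h2 m hm).1
          have e0 : pvCell g (a - 4) i = t := by
            have := hrun 3 (by omega); rwa [show a - 1 - 3 = a - 4 from by omega] at this
          have e1 : pvCell g (a - 4 + 1) i = t := by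
            have := hrun 2 (by omega); rwa [show a - 1 - 2 = a - 4 + 1 from by omega] at this
          have e2 : pvCell g (a - 4 + 2) i = t := by
            have := hrun 1 (by omega); rwa [show a - 1 - 1 = a - 4 + 2 from by omega] at this
          have e3 : pvCell g (a - 4 + 3) i = t := by
            have := hrun 0 (by omega); rwa [show a - 1 - 0 = a - 4 + 3 from by omega] at this
          have e4 : pvCell g (a - 4 + 4) i = t := by
            rwa [show a - 4 + 4 = a from by omega]
          have hwa : pvW g i (a - 4) = true :=
            (pvW_iff g i (a - 4)).2
              ⟨fun h => ht (e0.symm.trans h), e0.trans e1.symm, e0.trans e2.symm,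
               e0.trans e3.symm, e0.trans e4.symm⟩
          have hfind : (List.range (L - 4)).find? (fun j => pvW g i j) = some (a - 4) := by
            apply find?_range_some
            · omega
            · exact hwa
            · intro j hj
              rcases Bool.eq_false_or_eq_true (pvW g i j) with h | h
              · exact absurd (h5 j h) (by omega)
              · exact h
          simp [hfind, e0]
        · -- serie below 5: continue
          rw [if_neg (show ¬ (((s + 1 : Nat), t).1 = 5) from hfire)]
          apply ih (a + 1) (s + 1) t (by omega) (by omega) (by omega)
          · intro m hm
            rcases Nat.eq_zero_or_pos m with hm0 | hm0
            · subst hm0; exact ⟨by simpa using hct, ht⟩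
            · have := h2 (m - 1) (by omega)
              rwa [show a + 1 - 1 - m = a - 1 - (m - 1) from by omega]
          · omega
          · intro _
            rcases Nat.eq_zero_or_pos s with hs0 | hs0
            · rcases h3 hs0 with h | h
              · left; omega
              · right; left; subst hs0; rwa [show a + 1 - 1 - 1 = a - 1 from by omega]
            · rcases h4 hs0 with h | h | h
              · left; omega
              · right; left; rwa [show a + 1 - 1 - (s + 1) = a - 1 - s from by omega]
              · right; right; rwa [show a + 1 - 1 - (s + 1) = a - 1 - s from by omega]
          · intro j hw; have := h5 j hw; omega
      · -- new token: serie = 1, jeton = cell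
        have hp1 : (if pvCell g a i = " " then ((0 : Nat), t)
            else if pvCell g a i = t then (s + 1, t) else (1, pvCell g a i)) = (1, pvCell g a i) := by
          rw [if_neg hc0, if_neg hct]
        rw [hp1, if_neg (show ¬ (((1 : Nat), pvCell g a i).1 = 5) from by simp)]
        have h5' : ∀ j, pvW g i j = true → a ≤ j := by
          intro j hw
          by_contra hja
          rw [not_le] at hja
          have hj4 : a ≤ j + s := h5 j hw
          have hva : pvCell g a i = pvCell g j i := pvW_cell hw a (by omega) (by omega)
          have hva1 : pvCell g (a - 1) i = pvCell g j i := pvW_cell hw (a - 1) (by omega) (by omega)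
          rcases Nat.eq_zero_or_pos s with hs0 | hs0
          · rcases h3 hs0 with h | h
            · omega
            · exact pvW_nonblank hw (hva1 ▸ h)
          · have hm0 := (h2 0 (by omega)).1
            simp only [Nat.sub_zero] at hm0
            exact hct (by rw [hva, ← hva1, hm0])
        apply ih (a + 1) 1 (pvCell g a i) (by omega) (by omega) (by omega)
        · intro m hm
          have hm0 : m = 0 := by omega
          subst hm0
          exact ⟨by simp, hc0⟩
        · omega
        · intro _
          by_cases ha0 : a = 0
          · left; omega
          · rcases Nat.eq_zero_or_pos s with hs0 | hs0
            · rcases h3 hs0 with h | h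
              · omega
              · right; left; rwa [show a + 1 - 1 - 1 = a - 1 from by omega]
            · right; right
              rw [show a + 1 - 1 - 1 = a - 1 from by omega, show a - 1 = a - 1 - 0 from by omega]
              rw [(h2 0 hs0).1]
              exact fun h => hct h.symm
        · intro j hw; have := h5' j hw; omega

-- per-column equivalence: A's window search over range(L-4) = B's streak scan over range(L)
theorem col_eq (g : List (List String)) (i : Nat) :
    pvScanB g i 0 " " (List.range ((g.getD i []).length)) =
      pvRowA g i (List.range ((g.getD i []).length - 4)) := by
  rw [pvRowA_find, List.range_eq_range']
  exact pvScanB_invariant g i ((g.getD i []).length) ((g.getD i []).length) 0 0 " "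
    (by omega) (by omega) (by omega) (by omega) (fun _ => Or.inl rfl) (by omega)
    (fun j _ => by omega)

theorem grid_eq (g : List (List String)) (is : List Nat) :
    pvColsB g is = pvGridA g is := by
  induction is with
  | nil => simp [pvColsB, pvGridA]
  | cons i is ih =>
    simp only [pvColsB, pvGridA, List.getD_eq_getElem?_getD]
    have hc := col_eq g i
    simp only [List.getD_eq_getElem?_getD] at hc
    by_cases hL : ((g[i]?).getD []).length < 5
    · have h0 : ((g[i]?).getD []).length - 4 = 0 := by omega
      rw [if_pos hL, h0, List.range_zero]
      simp [pvRowA, ih]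
    · rw [if_neg hL, hc, ih]

-- ===== VERDICT (by name: the statement is the Claim_ definition above) =====
theorem Verifier_colonnes_spec : Claim_equal_Verifier_colonnes := by
  intro g _ _
  unfold Spec_Verifier_colonnes Verifier_colonnes Verifier_colonnes_alt
  rw [grid_eq]
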